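-- pv_equiv track=rewrite | github.com/chrisyang922/CS | CASCS111/Week4/ps3pr4.py | jscore
-- ===== SOURCE A (Python) =====
-- def jscore(s1, s2):
--     """ returns the number of shared characters between s1(parameter variable)
--     and s2 (parameter variables)
--     input s1, s2: any string
--     """
--     lc = [1 for x in s1 if x in s2]
--     lc2 = [1 for x in s2 if x in s1]
--     if lc < lc2:
--         sum_value = sum(lc)
--         return sum_value
--     else:
--         sum_value = sum(lc2)
--         return sum_value
-- ===== SOURCE B (Python) =====
-- def jscore(s1, s2):
--     """ returns the number of shared characters between s1 and s2 """
--     c1 = {}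
--     for ch in s1:
--         c1[ch] = c1.get(ch, 0) + 1
--     c2 = {}
--     for ch in s2:
--         c2[ch] = c2.get(ch, 0) + 1
--     count1 = 0
--     for ch, n in c1.items():
--         if ch in c2:
--             count1 += n
--     count2 = 0
--     for ch, n in c2.items():
--         if ch in c1:
--             count2 += n
--     return count1 if count1 < count2 else count2
-- ===== Notes on version B (the rewrite author's own statement) =====
-- stated objective: alternative
-- what changed: B builds a frequency dictionary per string once and sums the counts of the distinct characters present in the other string, then compares the two integer totals directly, instead of A's per-position all-ones list comprehensions with repeated substring membership tests and a disguised length comparison via list lexicographic order.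
import Mathlib
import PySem

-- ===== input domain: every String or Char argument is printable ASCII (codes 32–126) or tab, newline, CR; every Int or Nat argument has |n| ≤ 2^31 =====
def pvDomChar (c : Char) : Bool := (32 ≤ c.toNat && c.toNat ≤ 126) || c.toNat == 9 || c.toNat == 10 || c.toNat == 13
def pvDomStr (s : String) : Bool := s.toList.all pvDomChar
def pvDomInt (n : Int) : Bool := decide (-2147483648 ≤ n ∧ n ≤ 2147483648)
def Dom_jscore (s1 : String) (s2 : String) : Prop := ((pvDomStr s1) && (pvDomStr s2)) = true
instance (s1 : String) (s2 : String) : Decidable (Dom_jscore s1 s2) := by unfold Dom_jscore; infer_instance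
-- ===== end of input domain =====

-- B replaces A's per-position all-ones lists and their lexicographic comparison with two
-- frequency dictionaries and a direct comparison of the two integer totals (objective: alternative).

-- ===== PORT A =====
-- Python's '<' on lists of ints (lexicographic), as A compares lc < lc2
def pyListLtInt : List Int → List Int → Bool
  | _, [] => false
  | [], _ :: _ => true
  | a :: as, b :: bs => if a < b then true else if b < a then false else pyListLtInt as bs

def jscore (s1 : String) (s2 : String) : Int :=
  let lc := (s1.toList.filter (fun x => PySem.Chars.isIn [x] s2.toList)).map (fun _ => (1 : Int))
  let lc2 := (s2.toList.filter (fun x => PySem.Chars.isIn [x] s1.toList)).map (fun _ => (1 : Int))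
  if pyListLtInt lc lc2 then lc.sum else lc2.sum

-- ===== PORT B =====
-- Source B's frequency-dict builder: 'for ch in s: c[ch] = c.get(ch, 0) + 1'
def pvFreq (s : List Char) : PySem.Dict Char Int :=
  s.foldl (fun d x => d.insert x (d.getD x 0 + 1)) PySem.Dict.empty

def jscore_alt (s1 : String) (s2 : String) : Int :=
  let c1 := pvFreq s1.toList
  let c2 := pvFreq s2.toList
  let count1 := c1.items.foldl (fun acc p => if c2.contains p.1 then acc + p.2 else acc) 0
  let count2 := c2.items.foldl (fun acc p => if c1.contains p.1 then acc + p.2 else acc) 0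
  if count1 < count2 then count1 else count2

-- ===== PRECONDITION & SPEC =====
def Spec_jscore (s1 : String) (s2 : String) (out : Int) : Prop := out = jscore_alt s1 s2
instance (s1 : String) (s2 : String) (out : Int) : Decidable (Spec_jscore s1 s2 out) := by unfold Spec_jscore; infer_instance

-- ===== CLAIM (what is proved, stated in full; the proofs are below) =====
def Claim_equal_jscore : Prop := ∀ (s1 : String) (s2 : String), Dom_jscore s1 s2 → Spec_jscore s1 s2 (jscore s1 s2)

-- ===== LEMMAS AND PROOFS =====

-- Python's '<' on two all-ones lists is just a length comparison
theorem pyListLtInt_replicate (m n : Nat) :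
    pyListLtInt (List.replicate m 1) (List.replicate n 1) = decide (m < n) := by
  induction m generalizing n with
  | zero => cases n <;> simp [pyListLtInt, List.replicate]
  | succ m ih =>
    cases n with
    | zero => simp [pyListLtInt, List.replicate]
    | succ n => simp [pyListLtInt, List.replicate, ih n]

-- single-character 'x in s' is list membership
theorem isIn_singleton (x : Char) (l : List Char) :
    PySem.Chars.isIn [x] l = l.contains x := by
  by_cases h : x ∈ l
  · have hin : [x] <:+: l := by
      obtain ⟨p, q, rfl⟩ := List.append_of_mem h
      exact ⟨p, q, by simp⟩
    simp [(PySem.Chars.isIn_iff_infix [x] l).mpr hin, h]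
  · have hni : ¬ [x] <:+: l := fun hin => h (hin.mem (by simp))
    simp [(PySem.Chars.isIn_eq_false_iff [x] l).mpr hni, h]

theorem map_one_replicate (xs : List Char) :
    xs.map (fun _ => (1 : Int)) = List.replicate xs.length 1 := by
  simp

-- B's per-distinct-character sum over the frequency dict equals A's per-position count
theorem freq_sum_eq_countP (l : List Char) (p : Char → Bool) :
    ((pvFreq l).items.foldl (fun acc q => if p q.1 then acc + q.2 else acc) 0 : Int)
      = (l.countP p : Int) := by
  have h1 : pvFreq l = PySem.Dict.counter l := PySem.Dict.foldl_insert_getD_add_one_eq_counter l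
  rw [h1, PySem.List.foldl_if_eq_foldl_filter,
      PySem.List.foldl_add (l := _) (g := fun q : Char × Int => q.2) (a := 0),
      PySem.Dict.items_counter]
  have hperm : (PySem.Set.ofList l).Perm l.dedup := by
    rw [List.perm_ext_iff_of_nodup (PySem.Set.nodup_ofList l) l.nodup_dedup]
    intro a; simp [PySem.Set.mem_ofList]
  have hps : ((((PySem.Set.ofList l).map (fun k => (k, (l.count k : Int)))).filter
      (fun q => p q.1)).map (·.2)).sum
      = (((l.dedup.map (fun k => (k, (l.count k : Int)))).filter (fun q => p q.1)).map (·.2)).sum :=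
    List.Perm.sum_eq (((hperm.map _).filter _).map _)
  rw [hps]
  have h2 : ∀ ks : List Char, (((ks.map (fun k => (k, (l.count k : Int)))).filter
      (fun q => p q.1)).map (·.2)).sum = (((ks.filter p).map (fun k => (l.count k : Int)))).sum := by
    intro ks; induction ks with
    | nil => simp
    | cons k ks ih => by_cases hp : p k <;> simp [hp, ih]
  rw [h2, zero_add]
  have h3 := List.sum_map_count_dedup_filter_eq_countP p l
  calc ((l.dedup.filter p).map (fun k => (l.count k : Int))).sum
      = (((l.dedup.filter p).map (fun k => l.count k)).sum : Nat) := by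
        push_cast; rw [List.map_map]; rfl
    _ = (l.countP p : Int) := by rw [h3]

theorem jscore_eq_alt (s1 s2 : String) : jscore s1 s2 = jscore_alt s1 s2 := by
  unfold jscore jscore_alt
  have hc : ∀ l : List Char, ∀ x, (pvFreq l).contains x = l.contains x := by
    intro l x
    unfold pvFreq
    rw [PySem.Dict.foldl_insert_getD_add_one_eq_counter l]
    exact PySem.Dict.contains_counter l x
  have hb1 := freq_sum_eq_countP s1.toList (fun x => (pvFreq s2.toList).contains x)
  have hb2 := freq_sum_eq_countP s2.toList (fun x => (pvFreq s1.toList).contains x)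
  simp only [] at *
  rw [hb1, hb2]
  have hp1 : (fun x => PySem.Chars.isIn [x] s2.toList)
      = (fun x => (pvFreq s2.toList).contains x) := by
    funext x; rw [isIn_singleton, hc]
  have hp2 : (fun x => PySem.Chars.isIn [x] s1.toList)
      = (fun x => (pvFreq s1.toList).contains x) := by
    funext x; rw [isIn_singleton, hc]
  rw [hp1, hp2, map_one_replicate, map_one_replicate, pyListLtInt_replicate]
  simp only [List.sum_replicate, ← List.countP_eq_length_filter]
  split_ifs with h1 h2 h2 <;> simp_all <;> omega

-- ===== VERDICT (by name: the statement is the Claim_ definition above) =====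
theorem jscore_spec : Claim_equal_jscore := by
  intro s1 s2 _
  unfold Spec_jscore
  exact jscore_eq_alt s1 s2
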